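-- pv_equiv track=rewrite | github.com/Jhwee2/Python_Projects | School_Projects/Text-File-Stripper-main/Second Coding Assignment.py | uniqueFreq
-- ===== SOURCE A (Python) =====
-- def uniqueFreq(modifiedFile):
--     dict = {}
--     dict2 = {}
--     lst = modifiedFile
--     for item in lst:
--         if item not in dict:
--             dict[item] = 1
--         elif item in dict:
--             dict[item] += 1
--     for key,value in dict.items():
--         if value == 1:
--             dict2[key] = value
--     return dict2
-- ===== SOURCE B (Python) =====
-- def uniqueFreq(modifiedFile):
--     seen = set()
--     duplicates = set()
--     for item in modifiedFile:
--         if item in seen: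
--             duplicates.add(item)
--         else:
--             seen.add(item)
--     result = {}
--     for item in modifiedFile:
--         if item in seen and item not in duplicates:
--             result[item] = 1
--     return result
-- ===== Notes on version B (the rewrite author's own statement) =====
-- stated objective: alternative
-- what changed: Instead of building a full count dictionary and filtering its items by count==1, B tracks two sets (seen/duplicates) in one pass and then re-scans the input list, inserting item:1 for items seen exactly once; no per-item counts are ever computed.
import Mathlib
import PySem

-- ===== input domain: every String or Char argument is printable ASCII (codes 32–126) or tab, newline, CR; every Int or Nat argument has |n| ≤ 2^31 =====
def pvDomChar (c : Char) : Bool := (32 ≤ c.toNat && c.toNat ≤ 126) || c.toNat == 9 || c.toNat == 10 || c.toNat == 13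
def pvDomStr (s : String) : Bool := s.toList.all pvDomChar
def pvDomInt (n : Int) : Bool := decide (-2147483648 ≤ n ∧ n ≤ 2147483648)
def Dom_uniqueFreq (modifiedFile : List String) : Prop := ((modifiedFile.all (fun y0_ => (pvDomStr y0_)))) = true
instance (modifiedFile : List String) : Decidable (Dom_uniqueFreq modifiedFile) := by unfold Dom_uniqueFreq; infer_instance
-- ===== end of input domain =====

-- B replaces A's count-dict-then-filter with a seen/duplicates two-set pass plus a re-scan of
-- the input inserting item:1 for exactly-once items (objective: alternative, no counts computed).

-- ===== PORT A =====
-- first loop: counting dict; second loop: keep items with value == 1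
def uniqueFreq (modifiedFile : List String) : List (String × Int) :=
  let dict : PySem.Dict String Int := PySem.Dict.empty
  let dict2 : PySem.Dict String Int := PySem.Dict.empty
  let lst := modifiedFile
  let dict := lst.foldl (fun d item =>
    if !(d.contains item) then d.insert item 1
    else if d.contains item then d.modify item 0 (· + 1)
    else d) dict
  let dict2 := dict.items.foldl (fun d2 kv =>
    if kv.2 == 1 then d2.insert kv.1 kv.2 else d2) dict2
  dict2.items

-- ===== PORT B =====
-- pass 1: seen/duplicates sets; pass 2: re-scan the list, insert item:1 for exactly-once items
def uniqueFreq_alt (modifiedFile : List String) : List (String × Int) :=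
  let st := modifiedFile.foldl
    (fun (p : PySem.Set String × PySem.Set String) item =>
      if PySem.Set.contains p.1 item then (p.1, PySem.Set.add p.2 item)
      else (PySem.Set.add p.1 item, p.2))
    (PySem.Set.empty, PySem.Set.empty)
  let result := modifiedFile.foldl
    (fun (d : PySem.Dict String Int) item =>
      if PySem.Set.contains st.1 item && !(PySem.Set.contains st.2 item)
      then d.insert item 1 else d)
    PySem.Dict.empty
  result.items

-- ===== PRECONDITION & SPEC =====
def Spec_uniqueFreq (modifiedFile : List String) (out : List (String × Int)) : Prop := out = uniqueFreq_alt modifiedFile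
instance (modifiedFile : List String) (out : List (String × Int)) : Decidable (Spec_uniqueFreq modifiedFile out) := by unfold Spec_uniqueFreq; infer_instance

-- ===== CLAIM (what is proved, stated in full; the proofs are below) =====
def Claim_equal_uniqueFreq : Prop := ∀ (modifiedFile : List String), Dom_uniqueFreq modifiedFile → Spec_uniqueFreq modifiedFile (uniqueFreq modifiedFile)

-- ===== LEMMAS AND PROOFS =====

lemma aFold_eq_counter (xs : List String) :
    xs.foldl (fun d item =>
      if !(d.contains item) then d.insert item 1
      else if d.contains item then d.modify item 0 (· + 1)
      else d) PySem.Dict.empty = PySem.Dict.counter xs := by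
  rw [PySem.Dict.counter_eq_foldl]
  apply PySem.List.foldl_congr_mem'
  intro x _ d
  by_cases h : d.contains x = true
  · simp [h]
  · simp only [Bool.not_eq_true] at h
    simp [h, PySem.Dict.modify, PySem.Dict.getD_of_not_contains _ _ h]
lemma foldl_insert_pairs_filter (l : List (String × Int)) (d : PySem.Dict String Int)
    (hnd : (l.map Prod.fst).Nodup) (hfresh : ∀ kv ∈ l, d.contains kv.1 = false) :
    (l.foldl (fun d2 kv => if kv.2 == 1 then d2.insert kv.1 kv.2 else d2) d).items
      = d.items ++ l.filter (fun kv => kv.2 == 1) := by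
  induction l generalizing d with
  | nil => simp
  | cons kv t ih =>
    simp only [List.map_cons, List.nodup_cons] at hnd
    by_cases h : kv.2 == 1
    · simp only [List.foldl_cons, h, if_pos]
      rw [ih _ hnd.2 ?_, PySem.Dict.items_insert_of_not_contains _ _ (hfresh kv (by simp))]
      · simp [h]
      · intro y hy
        rw [PySem.Dict.contains_insert]
        have h1 : (y.1 == kv.1) = false := by
          simp only [beq_eq_false_iff_ne, ne_eq]
          intro he
          exact hnd.1 (he ▸ List.mem_map_of_mem hy)
        simp [h1, hfresh y (List.mem_cons_of_mem _ hy)]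
    · simp only [List.foldl_cons, h, if_neg, Bool.false_eq_true, not_false_iff]
      rw [ih _ hnd.2 (fun y hy => hfresh y (List.mem_cons_of_mem _ hy))]
      simp [h]
lemma bFold_fst (xs : List String) (s t : PySem.Set String) :
    (xs.foldl (fun (p : PySem.Set String × PySem.Set String) item =>
      if PySem.Set.contains p.1 item then (p.1, PySem.Set.add p.2 item)
      else (PySem.Set.add p.1 item, p.2)) (s, t)).1 = xs.foldl PySem.Set.add s := by
  induction xs generalizing s t with
  | nil => rfl
  | cons x l ih =>
    by_cases h : PySem.Set.contains s x = true
    · simp only [List.foldl_cons, h, if_pos, ih]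
      congr 1
      unfold PySem.Set.add
      rw [if_pos h]
    · simp only [List.foldl_cons, h, if_neg, Bool.false_eq_true, not_false_iff, ih]

lemma bFold_snd_mem (xs : List String) (s t : PySem.Set String) (y : String) :
    y ∈ (xs.foldl (fun (p : PySem.Set String × PySem.Set String) item =>
      if PySem.Set.contains p.1 item then (p.1, PySem.Set.add p.2 item)
      else (PySem.Set.add p.1 item, p.2)) (s, t)).2
      ↔ y ∈ t ∨ (y ∈ xs ∧ y ∈ s) ∨ 2 ≤ xs.count y := by
  induction xs generalizing s t with
  | nil => simp
  | cons x l ih =>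
    have hcl : y ∈ l ↔ 0 < l.count y := List.count_pos_iff.symm
    by_cases h : PySem.Set.contains s x = true
    · have hxs : x ∈ s := by simpa [PySem.Set.contains] using h
      simp only [List.foldl_cons, h, if_pos, ih, PySem.Set.mem_add, List.mem_cons]
      by_cases hyx : y = x
      · subst hyx
        simp [hxs]
      · simp only [hyx, or_false, false_or]
        rw [List.count_cons, if_neg (by exact fun he => hyx ((beq_iff_eq).mp he).symm)]
        simp
    · simp only [Bool.not_eq_true] at h
      have hxs : x ∉ s := by simpa [PySem.Set.contains] using h
      simp only [List.foldl_cons, h, if_neg, Bool.false_eq_true, not_false_iff, ih,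
        PySem.Set.mem_add, List.mem_cons]
      by_cases hyx : y = x
      · subst hyx
        rw [List.count_cons, if_pos (by simp)]
        constructor
        · rintro (h1 | ⟨h1, _⟩ | hc)
          · exact Or.inl h1
          · refine Or.inr (Or.inr ?_)
            rw [hcl] at h1
            omega
          · exact Or.inr (Or.inr (by omega))
        · rintro (h1 | ⟨_, h2⟩ | hc)
          · exact Or.inl h1
          · exact absurd h2 hxs
          · refine Or.inr (Or.inl ⟨hcl.mpr (by omega), Or.inr rfl⟩)
      · rw [List.count_cons, if_neg (by exact fun he => hyx ((beq_iff_eq).mp he).symm), add_zero]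
        constructor
        · rintro (h1 | ⟨h1, h2 | h3⟩ | hc)
          · exact Or.inl h1
          · exact Or.inr (Or.inl ⟨Or.inr h1, h2⟩)
          · exact absurd h3 hyx
          · exact Or.inr (Or.inr hc)
        · rintro (h1 | ⟨h1 | h1, h2⟩ | hc)
          · exact Or.inl h1
          · exact absurd h1 hyx
          · exact Or.inr (Or.inl ⟨h1, Or.inl h2⟩)
          · exact Or.inr (Or.inr hc)
lemma foldl_insert_once_filter (p : String → Bool) (l : List String) (d : PySem.Dict String Int)
    (h : ∀ x ∈ l, p x = true → l.count x ≤ 1 ∧ d.contains x = false) :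
    (l.foldl (fun d2 x => if p x then d2.insert x 1 else d2) d).items
      = d.items ++ (l.filter p).map (fun x => (x, (1 : Int))) := by
  induction l generalizing d with
  | nil => simp
  | cons x t ih =>
    by_cases hp : p x = true
    · obtain ⟨hc, hd⟩ := h x List.mem_cons_self hp
      rw [List.count_cons, if_pos (by simp)] at hc
      have hxt : x ∉ t := fun hm => by
        have := List.count_pos_iff.mpr hm
        omega
      simp only [List.foldl_cons, hp, if_pos]
      rw [ih _ ?_, PySem.Dict.items_insert_of_not_contains _ _ hd]
      · simp [hp]
      · intro y hy hpy
        obtain ⟨hc', hd'⟩ := h y (List.mem_cons_of_mem _ hy) hpy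
        refine ⟨le_trans (List.count_le_count_cons ..) hc', ?_⟩
        rw [PySem.Dict.contains_insert]
        have : (y == x) = false := by
          simp only [beq_eq_false_iff_ne, ne_eq]
          rintro rfl
          exact hxt hy
        simp [this, hd']
    · simp only [List.foldl_cons, hp, if_neg, Bool.false_eq_true, not_false_iff]
      rw [ih _ ?_]
      · simp [hp]
      · intro y hy hpy
        obtain ⟨hc', hd'⟩ := h y (List.mem_cons_of_mem _ hy) hpy
        exact ⟨le_trans (List.count_le_count_cons ..) hc', hd'⟩

lemma foldl_add_filter (p : String → Bool) (l : List String) (s : PySem.Set String)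
    (h : ∀ x ∈ l, p x = true → l.count x ≤ 1 ∧ x ∉ s) :
    (l.foldl PySem.Set.add s).filter p = s.filter p ++ l.filter p := by
  induction l generalizing s with
  | nil => simp
  | cons x t ih =>
    by_cases hp : p x = true
    · obtain ⟨hc, hs⟩ := h x List.mem_cons_self hp
      rw [List.count_cons, if_pos (by simp)] at hc
      have hxt : x ∉ t := fun hm => by
        have := List.count_pos_iff.mpr hm
        omega
      have hadd : PySem.Set.add s x = s ++ [x] := by
        unfold PySem.Set.add
        rw [if_neg (by simpa [PySem.Set.contains] using hs)]
      rw [List.foldl_cons, hadd, ih _ ?_]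
      · simp [hp]
      · intro y hy hpy
        obtain ⟨hc', hs'⟩ := h y (List.mem_cons_of_mem _ hy) hpy
        refine ⟨le_trans (List.count_le_count_cons ..) hc', ?_⟩
        simp only [List.mem_append, List.mem_singleton]
        rintro (h1 | rfl)
        · exact hs' h1
        · exact hxt hy
    · rw [List.foldl_cons]
      by_cases hmem : PySem.Set.contains s x = true
      · have hadd : PySem.Set.add s x = s := by
          unfold PySem.Set.add
          rw [if_pos hmem]
        rw [hadd, ih _ ?_]
        · simp [hp]
        · intro y hy hpy
          obtain ⟨hc', hs'⟩ := h y (List.mem_cons_of_mem _ hy) hpy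
          exact ⟨le_trans (List.count_le_count_cons ..) hc', hs'⟩
      · have hadd : PySem.Set.add s x = s ++ [x] := by
          unfold PySem.Set.add
          rw [if_neg hmem]
        rw [hadd, ih _ ?_]
        · simp [hp]
        · intro y hy hpy
          obtain ⟨hc', hs'⟩ := h y (List.mem_cons_of_mem _ hy) hpy
          refine ⟨le_trans (List.count_le_count_cons ..) hc', ?_⟩
          simp only [List.mem_append, List.mem_singleton]
          rintro (h1 | rfl)
          · exact hs' h1
          · exact absurd hpy (by simp [hp])

theorem uniqueFreq_eq (xs : List String) : uniqueFreq xs = uniqueFreq_alt xs := by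
  -- A side
  simp only [uniqueFreq, uniqueFreq_alt]
  rw [aFold_eq_counter,
      foldl_insert_pairs_filter _ _ (PySem.Dict.nodup_keys_counter xs)
        (fun kv _ => PySem.Dict.contains_empty kv.1),
      PySem.Dict.items_counter]
  -- B side state
  have hfst : (xs.foldl
      (fun (p : PySem.Set String × PySem.Set String) item =>
        if PySem.Set.contains p.1 item then (p.1, PySem.Set.add p.2 item)
        else (PySem.Set.add p.1 item, p.2))
      (PySem.Set.empty, PySem.Set.empty)).1 = PySem.Set.ofList xs := by
    rw [bFold_fst, PySem.Set.ofList_eq_foldl]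
    rfl
  have hsnd : ∀ y, y ∈ (xs.foldl
      (fun (p : PySem.Set String × PySem.Set String) item =>
        if PySem.Set.contains p.1 item then (p.1, PySem.Set.add p.2 item)
        else (PySem.Set.add p.1 item, p.2))
      (PySem.Set.empty, PySem.Set.empty)).2 ↔ 2 ≤ xs.count y := by
    intro y
    rw [bFold_snd_mem]
    simp [PySem.Set.empty]
  -- rewrite B's second fold condition to "count = 1"
  rw [PySem.List.foldl_congr_mem' _ _
      (fun (d : PySem.Dict String Int) x => if xs.count x == 1 then d.insert x 1 else d) _ ?_]
  · -- apply the once-filter lemma on B's side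
    rw [foldl_insert_once_filter _ _ _ ?_]
    · -- both sides are now filter/map expressions
      rw [List.filter_map]
      rw [List.filter_congr (l := PySem.Set.ofList xs)
          (q := fun k => xs.count k == 1) (fun k _ => by
            simp only [Function.comp]
            rcases h : xs.count k == 1 with _ | _
            · simp only [beq_eq_false_iff_ne, ne_eq] at h
              simp only [beq_eq_false_iff_ne, ne_eq]
              intro hint
              exact h (by exact_mod_cast hint)
            · simp only [beq_iff_eq] at h
              simp [h])]
      rw [PySem.Set.ofList_eq_foldl, foldl_add_filter _ _ _ (fun x _ hp => by
            simp only [beq_iff_eq] at hp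
            exact ⟨le_of_eq hp, List.not_mem_nil⟩)]
      simp only [List.filter_nil, List.nil_append]
      rw [show (PySem.Dict.empty : PySem.Dict String Int).items = [] from rfl, List.nil_append]
      apply List.map_congr_left
      intro k hk
      have := (List.mem_filter.mp hk).2
      simp only [beq_iff_eq] at this
      simp [this]
    · intro x _ hp
      simp only [beq_iff_eq] at hp
      exact ⟨le_of_eq hp, PySem.Dict.contains_empty x⟩
  · intro x hx d
    have h1 : PySem.Set.contains (xs.foldl
        (fun (p : PySem.Set String × PySem.Set String) item =>
          if PySem.Set.contains p.1 item then (p.1, PySem.Set.add p.2 item)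
          else (PySem.Set.add p.1 item, p.2))
        (PySem.Set.empty, PySem.Set.empty)).1 x = true := by
      rw [hfst]
      simp [PySem.Set.contains, PySem.Set.mem_ofList, hx]
    rw [h1]
    have hpos : 1 ≤ xs.count x := List.count_pos_iff.mpr hx
    by_cases h2 : 2 ≤ xs.count x
    · have hc : PySem.Set.contains (xs.foldl
          (fun (p : PySem.Set String × PySem.Set String) item =>
            if PySem.Set.contains p.1 item then (p.1, PySem.Set.add p.2 item)
            else (PySem.Set.add p.1 item, p.2))
          (PySem.Set.empty, PySem.Set.empty)).2 x = true := by
        show List.contains _ _ = true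
        rw [List.contains_eq_mem]
        exact decide_eq_true ((hsnd x).mpr h2)
      rw [hc]
      have : (xs.count x == 1) = false := by
        simp only [beq_eq_false_iff_ne, ne_eq]
        omega
      simp [this]
    · have hc : PySem.Set.contains (xs.foldl
          (fun (p : PySem.Set String × PySem.Set String) item =>
            if PySem.Set.contains p.1 item then (p.1, PySem.Set.add p.2 item)
            else (PySem.Set.add p.1 item, p.2))
          (PySem.Set.empty, PySem.Set.empty)).2 x = false := by
        show List.contains _ _ = false
        rw [List.contains_eq_mem]
        exact decide_eq_false (fun hm => h2 ((hsnd x).mp hm))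
      rw [hc]
      have : (xs.count x == 1) = true := by
        simp only [beq_iff_eq]
        omega
      simp [this]

-- ===== VERDICT (by name: the statement is the Claim_ definition above) =====
theorem uniqueFreq_spec : Claim_equal_uniqueFreq := fun xs _ => uniqueFreq_eq xs
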